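-- pv_equiv track=rewrite | github.com/elchin-hasanov/finance-news-assistant | backend/app/services/sp500.py | _strip_corp_suffixes
-- ===== SOURCE A (Python) =====
-- _CORP_SUFFIXES = (
--     " inc",
--     " incorporated",
--     " corp",
--     " corporation",
--     " ltd",
--     " limited",
--     " plc",
--     " co",
--     " company",
--     " group",
--     " holdings",
--     " holding",
-- )
--
-- def _strip_corp_suffixes(normalized: str) -> str:
--     s = normalized.strip()
--     # Repeatedly strip, because some names have multiple suffix-like words.
--     changed = True
--     while changed:
--         changed = False
--         for suf in _CORP_SUFFIXES:
--             if s.endswith(suf):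
--                 s = s[: -len(suf)].rstrip()
--                 changed = True
--     return s
-- ===== SOURCE B (Python) =====
-- _CORP_SUFFIXES = (
--     " inc",
--     " incorporated",
--     " corp",
--     " corporation",
--     " ltd",
--     " limited",
--     " plc",
--     " co",
--     " company",
--     " group",
--     " holdings",
--     " holding",
-- )
--
-- _SUFFIX_WORDS = frozenset(suf[1:] for suf in _CORP_SUFFIXES)
--
-- def _strip_corp_suffixes(normalized: str) -> str:
--     s = normalized.strip()
--     while True:
--         head, sep, tail = s.rpartition(' ')
--         if sep and tail in _SUFFIX_WORDS:
--             s = head.rstrip()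
--         else:
--             return s
-- ===== Notes on version B (the rewrite author's own statement) =====
-- stated objective: simpler
-- what changed: Replaces the repeated 12-way endswith scan (restarted until a pass makes no change) with a single rpartition loop that splits off the last space-separated word and tests it against a frozenset of bare suffix words; at most one suffix can match at a time, so the fixpoint is the same.
import Mathlib
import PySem

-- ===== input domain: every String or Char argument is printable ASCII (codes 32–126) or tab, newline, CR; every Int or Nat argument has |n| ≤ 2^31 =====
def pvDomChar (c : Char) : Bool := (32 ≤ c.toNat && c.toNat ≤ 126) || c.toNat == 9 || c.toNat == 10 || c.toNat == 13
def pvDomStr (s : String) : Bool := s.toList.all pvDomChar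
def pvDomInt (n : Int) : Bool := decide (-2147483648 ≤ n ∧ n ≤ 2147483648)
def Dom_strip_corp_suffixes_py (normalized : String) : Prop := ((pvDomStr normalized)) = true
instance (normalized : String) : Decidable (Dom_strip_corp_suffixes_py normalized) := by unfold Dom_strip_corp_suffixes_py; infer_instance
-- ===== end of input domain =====

-- B replaces A's restarted 12-way endswith scan by a single rpartition-last-word
-- loop with a set of bare suffix words; objective: simpler.


-- ===== PORT A =====

-- the module constant _CORP_SUFFIXES
def pvCorpSuffixes : List (List Char) :=
  [" inc".toList, " incorporated".toList, " corp".toList, " corporation".toList,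
   " ltd".toList, " limited".toList, " plc".toList, " co".toList,
   " company".toList, " group".toList, " holdings".toList, " holding".toList]

-- one run of A's inner `for suf in _CORP_SUFFIXES` loop; state = (s, changed)
def pvPassA (s : List Char) : List Char × Bool :=
  pvCorpSuffixes.foldl
    (fun st suf =>
      if PySem.Chars.endswith st.1 suf then
        (PySem.Chars.rstrip (PySem.Chars.slice st.1 none (some (-(suf.length : Int)))), true)
      else st)
    (s, false)

lemma pvRstrip_le (l : List Char) : (PySem.Chars.rstrip l).length ≤ l.length := by
  unfold PySem.Chars.rstrip
  have := List.length_dropWhile_le (p := PySem.Chars.isspace) (l := l.reverse)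
  simpa using this

-- termination fact for the while loop (cited by `decreasing_by` below)
lemma pvPassA_fold_len (L : List (List Char)) (hL : ∀ suf ∈ L, suf ≠ []) (st : List Char × Bool) :
    (L.foldl
      (fun st suf =>
        if PySem.Chars.endswith st.1 suf then
          (PySem.Chars.rstrip (PySem.Chars.slice st.1 none (some (-(suf.length : Int)))), true)
        else st) st).1.length ≤ st.1.length ∧
    ((L.foldl
      (fun st suf =>
        if PySem.Chars.endswith st.1 suf then
          (PySem.Chars.rstrip (PySem.Chars.slice st.1 none (some (-(suf.length : Int)))), true)
        else st) st).2 = st.2 ∨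
     (L.foldl
      (fun st suf =>
        if PySem.Chars.endswith st.1 suf then
          (PySem.Chars.rstrip (PySem.Chars.slice st.1 none (some (-(suf.length : Int)))), true)
        else st) st).1.length < st.1.length) := by
  induction L generalizing st with
  | nil => simp
  | cons suf L ih =>
    have hsuf : suf ≠ [] := hL suf (by simp)
    have hL' : ∀ s ∈ L, s ≠ [] := fun s hs => hL s (by simp [hs])
    simp only [List.foldl_cons]
    by_cases h : PySem.Chars.endswith st.1 suf = true
    · have hlen : (PySem.Chars.rstrip (PySem.Chars.slice st.1 none (some (-(suf.length : Int))))).length < st.1.length := by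
        have hsfx : suf <:+ st.1 := (PySem.Chars.endswith_iff _ _).mp h
        have hle : suf.length ≤ st.1.length := hsfx.length_le
        have hpos : 0 < suf.length := List.length_pos_iff.mpr hsuf
        rw [PySem.Chars.slice_eq_listSlice, PySem.List.slice_to_neg_natCast _ _ hpos]
        calc (PySem.Chars.rstrip (st.1.take (st.1.length - suf.length))).length
            ≤ (st.1.take (st.1.length - suf.length)).length := pvRstrip_le _
          _ ≤ st.1.length - suf.length := by simp
          _ < st.1.length := by omega
      have := ih hL' (PySem.Chars.rstrip (PySem.Chars.slice st.1 none (some (-(suf.length : Int)))), true)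
      simp only [h, if_true]
      exact ⟨le_trans this.1 (le_of_lt hlen), Or.inr (lt_of_le_of_lt this.1 hlen)⟩
    · simp only [h]
      simpa using ih hL' st

lemma pvPassA_shrink (s : List Char) (h : (pvPassA s).2 = true) :
    (pvPassA s).1.length < s.length := by
  have := pvPassA_fold_len pvCorpSuffixes (by decide) (s, false)
  rcases this.2 with h2 | h2
  · rw [pvPassA] at h; rw [h2] at h; exact absurd h (by simp)
  · exact h2

-- Python: `changed = True; while changed: changed = False; for suf in …; return s`
def pvWhileA (s : List Char) : List Char :=
  let r := pvPassA s
  if h : r.2 = true then pvWhileA r.1 else r.1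
termination_by s.length
decreasing_by exact pvPassA_shrink s h

def strip_corp_suffixes_py (normalized : String) : String :=
  String.ofList (pvWhileA (PySem.Chars.strip normalized.toList))

-- ===== PORT B =====

-- _SUFFIX_WORDS = frozenset(suf[1:] for suf in _CORP_SUFFIXES)
def pvSuffixWords : List (List Char) :=
  ["inc".toList, "incorporated".toList, "corp".toList, "corporation".toList,
   "ltd".toList, "limited".toList, "plc".toList, "co".toList,
   "company".toList, "group".toList, "holdings".toList, "holding".toList]

-- hand port of s.rpartition(' ') (exact for the one-char separator ' '):
-- split at the LAST space; ('', '', s) when there is no space.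
def pvRPartSpace (s : List Char) : List Char × List Char × List Char :=
  let revTail := s.reverse.takeWhile (fun c => c ≠ ' ')
  match s.reverse.dropWhile (fun c => c ≠ ' ') with
  | [] => ([], [], s)
  | _ :: revHead => (revHead.reverse, [' '], revTail.reverse)

lemma pvRPartSpace_eq (s : List Char) :
    pvRPartSpace s =
      match s.reverse.dropWhile (fun c => c ≠ ' ') with
      | [] => ([], [], s)
      | _ :: revHead => (revHead.reverse, [' '], (s.reverse.takeWhile (fun c => c ≠ ' ')).reverse) := rfl

lemma pvRPartSpace_shrink (s : List Char) (h : (pvRPartSpace s).2.1 ≠ []) :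
    (PySem.Chars.rstrip (pvRPartSpace s).1).length < s.length := by
  rcases hd : s.reverse.dropWhile (fun c => c ≠ ' ') with _ | ⟨c, revHead⟩
  · rw [pvRPartSpace_eq, hd] at h
    simp at h
  · rw [pvRPartSpace_eq, hd]
    show (PySem.Chars.rstrip revHead.reverse).length < s.length
    have hsplit : s.reverse = s.reverse.takeWhile (fun c => c ≠ ' ') ++ c :: revHead := by
      conv_lhs => rw [← List.takeWhile_append_dropWhile (p := fun c => c ≠ ' ') (l := s.reverse), hd]
    have hlen : revHead.length < s.length := by
      have := congrArg List.length hsplit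
      simp at this
      omega
    have hr := pvRstrip_le revHead.reverse
    simp at hr
    omega

-- Python: `while True: head, sep, tail = s.rpartition(' '); if sep and tail in …`
def pvWhileB (s : List Char) : List Char :=
  let p := pvRPartSpace s
  if h : p.2.1 ≠ [] ∧ p.2.2 ∈ pvSuffixWords then pvWhileB (PySem.Chars.rstrip p.1) else s
termination_by s.length
decreasing_by exact pvRPartSpace_shrink s h.1

def strip_corp_suffixes_py_alt (normalized : String) : String :=
  String.ofList (pvWhileB (PySem.Chars.strip normalized.toList))

-- ===== PRECONDITION & SPEC =====
def Spec_strip_corp_suffixes_py (normalized : String) (out : String) : Prop := out = strip_corp_suffixes_py_alt normalized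
instance (normalized : String) (out : String) : Decidable (Spec_strip_corp_suffixes_py normalized out) := by unfold Spec_strip_corp_suffixes_py; infer_instance

-- ===== CLAIM (what is proved, stated in full; the proofs are below) =====
def Claim_equal_strip_corp_suffixes_py : Prop := ∀ (normalized : String), Dom_strip_corp_suffixes_py normalized → Spec_strip_corp_suffixes_py normalized (strip_corp_suffixes_py normalized)

-- ===== LEMMAS AND PROOFS =====

lemma pvDropWhile_head {α : Type} (p : α → Bool) (l : List α) (c : α) (t : List α)
    (h : l.dropWhile p = c :: t) : p c = false := by
  induction l with
  | nil => simp at h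
  | cons x xs ih =>
    rw [List.dropWhile_cons] at h
    by_cases hx : p x = true
    · rw [if_pos hx] at h
      exact ih h
    · rw [if_neg hx] at h
      cases h
      simpa using hx


-- rpartition decomposition: with a space present, s = head ++ ' ' :: tail, no space in tail
lemma pvRPartSpace_decomp (s : List Char) (h : (pvRPartSpace s).2.1 ≠ []) :
    s = (pvRPartSpace s).1 ++ ' ' :: (pvRPartSpace s).2.2 ∧ ' ' ∉ (pvRPartSpace s).2.2 := by
  rcases hd : s.reverse.dropWhile (fun c => c ≠ ' ') with _ | ⟨c, revHead⟩
  · rw [pvRPartSpace_eq, hd] at h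
    simp at h
  · rw [pvRPartSpace_eq, hd]
    show s = revHead.reverse ++ ' ' :: (s.reverse.takeWhile (fun c => c ≠ ' ')).reverse ∧
         ' ' ∉ (s.reverse.takeWhile (fun c => c ≠ ' ')).reverse
    have hc : c = ' ' := by
      have h2 := pvDropWhile_head _ _ _ _ hd
      simpa using h2
    have hsplit : s.reverse = s.reverse.takeWhile (fun c => c ≠ ' ') ++ c :: revHead := by
      conv_lhs => rw [← List.takeWhile_append_dropWhile (p := fun c => c ≠ ' ') (l := s.reverse), hd]
    constructor
    · conv_lhs => rw [← List.reverse_reverse s, hsplit]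
      rw [hc]
      simp
    · intro hmem
      have hmem' : ' ' ∈ s.reverse.takeWhile (fun c => c ≠ ' ') := List.mem_reverse.mp hmem
      have h4 := List.mem_takeWhile_imp hmem'
      simp at h4

lemma pvRPartSpace_no_space (s : List Char) (h : (pvRPartSpace s).2.1 = []) : ' ' ∉ s := by
  rcases hd : s.reverse.dropWhile (fun c => c ≠ ' ') with _ | ⟨c, revHead⟩
  · intro hmem
    have htk : s.reverse.takeWhile (fun c => c ≠ ' ') = s.reverse := by
      conv_rhs => rw [← List.takeWhile_append_dropWhile (p := fun c => c ≠ ' ') (l := s.reverse), hd]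
      simp
    have h4 := List.mem_takeWhile_imp (l := s.reverse) (p := fun c => c ≠ ' ')
      (htk ▸ List.mem_reverse.mpr hmem)
    simp at h4
  · rw [pvRPartSpace_eq, hd] at h
    simp at h

-- a word-shaped suffix is exactly the rpartition tail
lemma pvTakeWhile_append (a b : List Char) (ha : ' ' ∉ a) :
    (a ++ ' ' :: b).takeWhile (fun c => c ≠ ' ') = a := by
  induction a with
  | nil => simp
  | cons x a ih =>
    have hx : x ≠ ' ' := fun h => ha (by simp [h])
    have ha' : ' ' ∉ a := fun h => ha (by simp [h])
    rw [List.cons_append, List.takeWhile_cons_of_pos (by simpa using hx), ih ha']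

lemma pvSuffix_eq_tail (head tail w : List Char) (htail : ' ' ∉ tail) (hw : ' ' ∉ w)
    (h : (' ' :: w) <:+ head ++ ' ' :: tail) : w = tail := by
  obtain ⟨pre, hpre⟩ := h
  have hrev : w.reverse ++ ' ' :: pre.reverse = tail.reverse ++ ' ' :: head.reverse := by
    have := congrArg List.reverse hpre
    simpa using this
  have h1 : (tail.reverse ++ ' ' :: head.reverse).takeWhile (fun c => c ≠ ' ') = tail.reverse :=
    pvTakeWhile_append _ _ (by simpa using htail)
  have h2 : (w.reverse ++ ' ' :: pre.reverse).takeWhile (fun c => c ≠ ' ') = w.reverse :=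
    pvTakeWhile_append _ _ (by simpa using hw)
  exact List.reverse_injective (by rw [← h2, hrev, h1])

lemma pvWords_no_space (w : List Char) (hw : w ∈ pvSuffixWords) : ' ' ∉ w := by
  fin_cases hw <;> decide

lemma pvSuffixes_words : pvCorpSuffixes = pvSuffixWords.map (fun w => ' ' :: w) := by decide

-- the key step equivalence: endswith (' '::w) ↔ rpartition's tail is w (with a space present),
-- and the stripped string agrees.
lemma pvStep_iff (s w : List Char) (hw : ' ' ∉ w) :
    (PySem.Chars.endswith s (' ' :: w) = true) ↔
      ((pvRPartSpace s).2.1 ≠ [] ∧ (pvRPartSpace s).2.2 = w) := by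
  constructor
  · intro h
    have hsfx : (' ' :: w) <:+ s := (PySem.Chars.endswith_iff _ _).mp h
    have hsp : ' ' ∈ s := hsfx.mem (by simp)
    have hne : (pvRPartSpace s).2.1 ≠ [] := fun hnil => pvRPartSpace_no_space s hnil hsp
    obtain ⟨hdec, htail⟩ := pvRPartSpace_decomp s hne
    refine ⟨hne, ?_⟩
    exact (pvSuffix_eq_tail _ _ _ htail hw (hdec ▸ hsfx)).symm
  · rintro ⟨hne, hw'⟩
    obtain ⟨hdec, -⟩ := pvRPartSpace_decomp s hne
    rw [PySem.Chars.endswith_iff, hdec, hw']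
    exact ⟨_, rfl⟩

lemma pvStep_result (s w : List Char) (hw : ' ' ∉ w)
    (h : PySem.Chars.endswith s (' ' :: w) = true) :
    PySem.Chars.slice s none (some (-((' ' :: w).length : Int))) = (pvRPartSpace s).1 := by
  obtain ⟨hne, hw'⟩ := (pvStep_iff s w hw).mp h
  obtain ⟨hdec, -⟩ := pvRPartSpace_decomp s hne
  rw [hw'] at hdec
  rw [PySem.Chars.slice_eq_listSlice,
      PySem.List.slice_to_neg_natCast _ _ (by simp : 0 < (' ' :: w).length)]
  set hd1 := (pvRPartSpace s).1 with hh
  rw [hdec]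
  have hlen : (hd1 ++ ' ' :: w).length - (' ' :: w).length = hd1.length := by
    simp
  rw [hlen]
  exact List.take_left

-- pvWhileB's unfolding equation
lemma pvWhileB_eq (s : List Char) :
    pvWhileB s =
      if (pvRPartSpace s).2.1 ≠ [] ∧ (pvRPartSpace s).2.2 ∈ pvSuffixWords then
        pvWhileB (PySem.Chars.rstrip (pvRPartSpace s).1)
      else s := by
  rw [pvWhileB]
  simp only [dite_eq_ite]

-- B absorbs one A-style suffix strip
lemma pvWhileB_step (s w : List Char) (hw : w ∈ pvSuffixWords)
    (h : PySem.Chars.endswith s (' ' :: w) = true) :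
    pvWhileB (PySem.Chars.rstrip (PySem.Chars.slice s none (some (-((' ' :: w).length : Int))))) =
      pvWhileB s := by
  have hwsp := pvWords_no_space w hw
  obtain ⟨hne, hw'⟩ := (pvStep_iff s w hwsp).mp h
  rw [pvStep_result s w hwsp h]
  conv_rhs => rw [pvWhileB_eq]
  simp [hne, hw', hw]

-- B is invariant under A's whole inner pass (generalized over the suffix list)
lemma pvWhileB_fold (L : List (List Char)) (hL : ∀ suf ∈ L, suf ∈ pvCorpSuffixes)
    (st : List Char × Bool) :
    pvWhileB (L.foldl
      (fun st suf =>
        if PySem.Chars.endswith st.1 suf then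
          (PySem.Chars.rstrip (PySem.Chars.slice st.1 none (some (-(suf.length : Int)))), true)
        else st) st).1 = pvWhileB st.1 := by
  induction L generalizing st with
  | nil => rfl
  | cons suf L ih =>
    have hmem := hL suf (by simp)
    have hL' : ∀ s ∈ L, s ∈ pvCorpSuffixes := fun s hs => hL s (by simp [hs])
    obtain ⟨w, hw, rfl⟩ : ∃ w ∈ pvSuffixWords, suf = ' ' :: w := by
      rw [pvSuffixes_words] at hmem
      obtain ⟨w, hw, he⟩ := List.mem_map.mp hmem
      exact ⟨w, hw, he.symm⟩
    simp only [List.foldl_cons]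
    by_cases h : PySem.Chars.endswith st.1 (' ' :: w) = true
    · simp only [h, if_true]
      rw [ih hL']
      exact pvWhileB_step st.1 w hw h
    · simp only [h]
      simpa using ih hL' st

-- the changed flag never reverts to false within a pass
lemma pvFold_flag_true (L : List (List Char)) (st : List Char × Bool) (h : st.2 = true) :
    (L.foldl
      (fun st suf =>
        if PySem.Chars.endswith st.1 suf then
          (PySem.Chars.rstrip (PySem.Chars.slice st.1 none (some (-(suf.length : Int)))), true)
        else st) st).2 = true := by
  induction L generalizing st with
  | nil => exact h
  | cons suf L ih =>
    simp only [List.foldl_cons]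
    by_cases hm : PySem.Chars.endswith st.1 suf = true
    · simp only [hm, if_true]; exact ih _ rfl
    · simp only [hm]; simpa using ih st h

-- if the pass reports no change, the state is unchanged and no suffix matches
lemma pvPassA_false_fold (L : List (List Char)) (s : List Char)
    (h : (L.foldl
      (fun st suf =>
        if PySem.Chars.endswith st.1 suf then
          (PySem.Chars.rstrip (PySem.Chars.slice st.1 none (some (-(suf.length : Int)))), true)
        else st) (s, false)).2 = false) :
    (L.foldl
      (fun st suf =>
        if PySem.Chars.endswith st.1 suf then
          (PySem.Chars.rstrip (PySem.Chars.slice st.1 none (some (-(suf.length : Int)))), true)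
        else st) (s, false)).1 = s ∧ ∀ suf ∈ L, PySem.Chars.endswith s suf = false := by
  induction L generalizing s with
  | nil => simpa using fun suf h => absurd h (by simp)
  | cons suf L ih =>
    simp only [List.foldl_cons] at h ⊢
    by_cases hm : PySem.Chars.endswith s suf = true
    · exfalso
      simp only [hm, if_true] at h
      rw [pvFold_flag_true L _ rfl] at h
      exact absurd h (by simp)
    · simp only [hm] at h ⊢
      have := ih s (by simpa using h)
      refine ⟨by simpa using this.1, ?_⟩
      intro x hx
      rcases List.mem_cons.mp hx with rfl | hx'
      · simpa using hm
      · exact this.2 x hx'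

-- if no pass changes anything, B does not strip either
lemma pvWhileB_fix (s : List Char) (h : ∀ suf ∈ pvCorpSuffixes, PySem.Chars.endswith s suf = false) :
    pvWhileB s = s := by
  rw [pvWhileB_eq]
  by_cases hc : (pvRPartSpace s).2.1 ≠ [] ∧ (pvRPartSpace s).2.2 ∈ pvSuffixWords
  · exfalso
    obtain ⟨hne, hmem⟩ := hc
    have hwsp := pvWords_no_space _ hmem
    have hend : PySem.Chars.endswith s (' ' :: (pvRPartSpace s).2.2) = true :=
      (pvStep_iff s _ hwsp).mpr ⟨hne, rfl⟩
    have hsuf : (' ' :: (pvRPartSpace s).2.2) ∈ pvCorpSuffixes := by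
      rw [pvSuffixes_words]; exact List.mem_map.mpr ⟨_, hmem, rfl⟩
    have := h _ hsuf
    rw [hend] at this; exact absurd this (by simp)
  · simp [hc]

-- pvWhileA's unfolding equation
lemma pvWhileA_eq (s : List Char) :
    pvWhileA s = if (pvPassA s).2 = true then pvWhileA (pvPassA s).1 else (pvPassA s).1 := by
  rw [pvWhileA.eq_def]
  simp only [dite_eq_ite]

-- main equality on the char-list level
lemma pvWhile_eq (s : List Char) : pvWhileA s = pvWhileB s := by
  suffices H : ∀ (n : Nat) (s : List Char), s.length < n → pvWhileA s = pvWhileB s from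
    H (s.length + 1) s (by omega)
  intro n
  induction n with
  | zero => intro s hs; omega
  | succ n ih =>
    intro s hs
    rw [pvWhileA_eq]
    by_cases h : (pvPassA s).2 = true
    · have hlt : (pvPassA s).1.length < s.length := pvPassA_shrink s h
      rw [if_pos h]
      rw [ih (pvPassA s).1 (by omega)]
      exact pvWhileB_fold pvCorpSuffixes (fun _ hx => hx) (s, false)
    · rw [if_neg h]
      have hf : (pvPassA s).2 = false := by simpa using h
      obtain ⟨h1, h2⟩ := pvPassA_false_fold pvCorpSuffixes s hf
      rw [pvWhileB_fix s h2]
      exact h1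

theorem pv_main (normalized : String) :
    strip_corp_suffixes_py normalized = strip_corp_suffixes_py_alt normalized := by
  unfold strip_corp_suffixes_py strip_corp_suffixes_py_alt
  rw [pvWhile_eq]

-- ===== VERDICT (by name: the statement is the Claim_ definition above) =====
theorem strip_corp_suffixes_py_spec : Claim_equal_strip_corp_suffixes_py := by
  intro normalized _
  unfold Spec_strip_corp_suffixes_py
  exact pv_main normalized
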